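-- pv_equiv track=rewrite | github.com/SafeguardLi/Security_of_CP-DRL-TSC | src/trafficsignalcontrollers/nextphaserltsc.py | adjust_ini_pos
-- ===== SOURCE A (Python) =====
-- def adjust_ini_pos(initial_dist2bar, initial_dist_ls):
--     if not initial_dist_ls:
--         return initial_dist2bar
--
--     closest = min(initial_dist_ls, key=lambda x: abs(x - initial_dist2bar))
--     diff = abs(initial_dist2bar - closest)
--
--     if diff >= 6:
--         return initial_dist2bar
--
--     candidate = initial_dist2bar
--     while any(abs(candidate - x) < 6 for x in initial_dist_ls):
--         candidate -= 6
--
--     return candidate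
-- ===== SOURCE B (Python) =====
-- def adjust_ini_pos(initial_dist2bar, initial_dist_ls):
--     # Mark every step count k whose candidate initial_dist2bar - 6*k lands
--     # within 5 of some listed distance; then take the smallest unmarked k.
--     forbidden = set()
--     for x in initial_dist_ls:
--         lo = (initial_dist2bar - x) // 6          # = ceil((d - x - 5) / 6)
--         hi = (initial_dist2bar - x + 5) // 6      # = floor((d - x + 5) / 6)
--         for k in range(lo, hi + 1):
--             forbidden.add(k)
--     k = 0
--     while k in forbidden:
--         k += 1
--     return initial_dist2bar - 6 * k
-- ===== Notes on version B (the rewrite author's own statement) =====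
-- stated objective: alternative
-- what changed: Instead of re-scanning the whole list for each shifted candidate, B computes in one pass the set of forbidden step counts k (each list element blocks at most two values of k) and then returns d - 6*k for the smallest non-forbidden k; the shift loop's O(n) inner scan becomes an O(1) set lookup.
import Mathlib
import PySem

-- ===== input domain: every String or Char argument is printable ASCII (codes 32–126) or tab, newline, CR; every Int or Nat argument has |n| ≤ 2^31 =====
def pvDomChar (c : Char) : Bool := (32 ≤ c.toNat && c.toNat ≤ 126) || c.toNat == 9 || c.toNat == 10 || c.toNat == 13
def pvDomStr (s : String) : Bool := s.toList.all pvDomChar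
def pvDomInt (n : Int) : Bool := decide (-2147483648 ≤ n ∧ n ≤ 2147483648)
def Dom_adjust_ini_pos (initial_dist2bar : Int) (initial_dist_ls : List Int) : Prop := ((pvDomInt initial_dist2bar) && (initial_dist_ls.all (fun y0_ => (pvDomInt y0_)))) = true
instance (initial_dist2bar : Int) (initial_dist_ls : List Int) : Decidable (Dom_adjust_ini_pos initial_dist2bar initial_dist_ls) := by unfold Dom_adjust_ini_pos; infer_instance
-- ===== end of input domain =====

-- B replaces A's repeated whole-list scans per shifted candidate by one pass that
-- marks the forbidden step counts, then takes the smallest unmarked one.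

-- ===== PORT A =====

-- foldl min is below its initial value (termination helper)
theorem pvFoldlMin_le_init (t : List Int) (b : Int) : t.foldl min b ≤ b := by
  induction t generalizing b with
  | nil => simp
  | cons z t' ih => exact le_trans (ih (min b z)) (min_le_left _ _)

-- lower bound of a list under foldl min (termination helper for the while loop)
theorem pvFoldlMin_le {xs : List Int} {x : Int} (a : Int) (hx : x ∈ xs) :
    xs.foldl min a ≤ x := by
  induction xs generalizing a with
  | nil => cases hx
  | cons y t ih =>
    rcases List.mem_cons.mp hx with rfl | hx'
    · exact le_trans (pvFoldlMin_le_init t (min a x)) (min_le_right _ _)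
    · exact ih _ hx'

def pvLoopA (xs : List Int) (c : Int) : Int :=
  if xs.any (fun x => |c - x| < 6) then pvLoopA xs (c - 6) else c
termination_by (c - (xs.foldl min 0 - 6)).toNat
decreasing_by
  rename_i h
  obtain ⟨x, hmem, hx⟩ := List.any_eq_true.mp h
  have h1 := pvFoldlMin_le (xs := xs) (x := x) 0 hmem
  simp only [decide_eq_true_eq] at hx
  rw [abs_lt] at hx
  omega

def adjust_ini_pos (initial_dist2bar : Int) (initial_dist_ls : List Int) : Int :=
  if initial_dist_ls = [] then initial_dist2bar
  else
    match PySem.List.min? initial_dist_ls (fun x => |x - initial_dist2bar|) with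
    | none => initial_dist2bar
    | some closest =>
      let diff := |initial_dist2bar - closest|
      if diff ≥ 6 then initial_dist2bar
      else pvLoopA initial_dist_ls initial_dist2bar

-- ===== PORT B =====

def pvForbidden (d : Int) (xs : List Int) : PySem.Set Int :=
  xs.foldl
    (fun s x =>
      (PySem.List.pyRange (PySem.Int.floordiv (d - x) 6)
          (PySem.Int.floordiv (d - x + 5) 6 + 1) 1).foldl
        (fun s k => PySem.Set.add s k) s)
    PySem.Set.empty

-- foldl max is above its initial value (termination helper)
theorem pvInit_le_foldl_max (t : List Int) (b : Int) : b ≤ t.foldl max b := by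
  induction t generalizing b with
  | nil => simp
  | cons z t' ih => exact le_trans (le_max_left _ _) (ih (max b z))

-- upper bound of a list under foldl max (termination helper for the while loop)
theorem pvLe_foldl_max {F : List Int} {x : Int} (a : Int) (hx : x ∈ F) :
    x ≤ F.foldl max a := by
  induction F generalizing a with
  | nil => cases hx
  | cons y t ih =>
    rcases List.mem_cons.mp hx with rfl | hx'
    · exact le_trans (le_max_right a x) (pvInit_le_foldl_max t (max a x))
    · exact ih _ hx'

def pvBLoop (F : PySem.Set Int) (k : Int) : Int :=
  if k ∈ F then pvBLoop F (k + 1) else k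
termination_by (F.foldl max 0 + 1 - k).toNat
decreasing_by
  rename_i h
  have := pvLe_foldl_max (F := F) (x := k) 0 h
  omega

def adjust_ini_pos_alt (initial_dist2bar : Int) (initial_dist_ls : List Int) : Int :=
  initial_dist2bar - 6 * pvBLoop (pvForbidden initial_dist2bar initial_dist_ls) 0

-- ===== PRECONDITION & SPEC =====
def Spec_adjust_ini_pos (initial_dist2bar : Int) (initial_dist_ls : List Int) (out : Int) : Prop := out = adjust_ini_pos_alt initial_dist2bar initial_dist_ls
instance (initial_dist2bar : Int) (initial_dist_ls : List Int) (out : Int) : Decidable (Spec_adjust_ini_pos initial_dist2bar initial_dist_ls out) := by unfold Spec_adjust_ini_pos; infer_instance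

-- ===== CLAIM (what is proved, stated in full; the proofs are below) =====
def Claim_equal_adjust_ini_pos : Prop := ∀ (initial_dist2bar : Int) (initial_dist_ls : List Int), Dom_adjust_ini_pos initial_dist2bar initial_dist_ls → Spec_adjust_ini_pos initial_dist2bar initial_dist_ls (adjust_ini_pos initial_dist2bar initial_dist_ls)

-- ===== LEMMAS AND PROOFS =====

-- floor-division brackets: q = a // 6 satisfies q*6 ≤ a < (q+1)*6
theorem pvFloordiv_facts (a : Int) :
    PySem.Int.floordiv a 6 * 6 ≤ a ∧ a < (PySem.Int.floordiv a 6 + 1) * 6 :=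
  (PySem.Int.floordiv_eq_iff_of_pos (by omega)).mp rfl

-- the range [ (d-x)//6 , (d-x+5)//6 ] contains exactly the k with |d-6k-x| < 6
theorem pvRange_bracket (d x k : Int) :
    (PySem.Int.floordiv (d - x) 6 ≤ k ∧ k ≤ PySem.Int.floordiv (d - x + 5) 6) ↔
      |d - 6 * k - x| < 6 := by
  have h1 := pvFloordiv_facts (d - x)
  have h2 := pvFloordiv_facts (d - x + 5)
  rw [abs_lt]
  omega

-- membership in a set built by foldl-add
theorem pvMem_foldl_add {l : List Int} {s : PySem.Set Int} {a : Int} :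
    a ∈ l.foldl (fun s k => PySem.Set.add s k) s ↔ a ∈ s ∨ a ∈ l := by
  induction l generalizing s with
  | nil => simp
  | cons y t ih =>
    simp only [List.foldl_cons, ih, PySem.Set.mem_add, List.mem_cons]
    tauto

-- what pvForbidden contains: exactly the step counts k blocked by some x
theorem pvMem_forbidden {d : Int} {xs : List Int} {k : Int} :
    k ∈ pvForbidden d xs ↔ ∃ x ∈ xs, |d - 6 * k - x| < 6 := by
  have key : ∀ (s : PySem.Set Int),
      k ∈ xs.foldl
        (fun s x =>
          (PySem.List.pyRange (PySem.Int.floordiv (d - x) 6)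
              (PySem.Int.floordiv (d - x + 5) 6 + 1) 1).foldl
            (fun s k => PySem.Set.add s k) s)
        s ↔ k ∈ s ∨ ∃ x ∈ xs, |d - 6 * k - x| < 6 := by
    induction xs with
    | nil => simp
    | cons y t ih =>
      intro s
      simp only [List.foldl_cons, ih, pvMem_foldl_add, PySem.List.mem_pyRange_one,
        List.mem_cons]
      constructor
      · rintro ((hs | ⟨hlo, hhi⟩) | ⟨x, hx, hn⟩)
        · exact Or.inl hs
        · exact Or.inr ⟨y, Or.inl rfl, (pvRange_bracket d y k).mp ⟨hlo, by omega⟩⟩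
        · exact Or.inr ⟨x, Or.inr hx, hn⟩
      · rintro (hs | ⟨x, (rfl | hx), hn⟩)
        · exact Or.inl (Or.inl hs)
        · have := (pvRange_bracket d x k).mpr hn
          exact Or.inl (Or.inr ⟨this.1, by omega⟩)
        · exact Or.inr ⟨x, hx, hn⟩
  simpa [pvForbidden] using key PySem.Set.empty

-- loop agreement: A's candidate walk and B's step-count walk move in lockstep
theorem pvLoop_agree (d : Int) (xs : List Int) :
    ∀ k : Int, pvLoopA xs (d - 6 * k) = d - 6 * pvBLoop (pvForbidden d xs) k := by
  intro k
  fun_induction pvBLoop (pvForbidden d xs) k with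
  | case1 k hmem ih =>
    rw [pvLoopA]
    have hany : xs.any (fun x => decide (|d - 6 * k - x| < 6)) = true := by
      obtain ⟨x, hx, hn⟩ := pvMem_forbidden.mp hmem
      exact List.any_eq_true.mpr ⟨x, hx, by simpa using hn⟩
    rw [if_pos hany]
    have harith : d - 6 * k - 6 = d - 6 * (k + 1) := by ring
    rw [harith, ih]
  | case2 k hmem =>
    rw [pvLoopA]
    have hany : xs.any (fun x => decide (|d - 6 * k - x| < 6)) = false := by
      rw [List.any_eq_false]
      intro x hx hn
      exact hmem (pvMem_forbidden.mpr ⟨x, hx, by simpa using hn⟩)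
    rw [if_neg (by simp [hany])]

-- ===== VERDICT (by name: the statement is the Claim_ definition above) =====
theorem adjust_ini_pos_spec : Claim_equal_adjust_ini_pos := by
  intro d xs _
  unfold Spec_adjust_ini_pos adjust_ini_pos adjust_ini_pos_alt
  by_cases hnil : xs = []
  · subst hnil
    rw [if_pos rfl, pvBLoop]
    simp [pvForbidden, PySem.Set.empty]
  · rw [if_neg hnil]
    cases hc : PySem.List.min? xs (fun x => |x - d|) with
    | none => exact absurd ((PySem.List.min?_eq_none_iff xs _).mp hc) hnil
    | some closest =>
    show (if |d - closest| ≥ 6 then d else pvLoopA xs d) = d - 6 * pvBLoop (pvForbidden d xs) 0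
    by_cases hdiff : |d - closest| ≥ 6
    · rw [if_pos hdiff]
      have h0 : (0 : Int) ∉ pvForbidden d xs := by
        intro hmem
        obtain ⟨x, hx, hn⟩ := pvMem_forbidden.mp hmem
        have hmin := PySem.List.min?_isMin hc x hx
        have hcd : |x - d| < 6 := by rw [abs_sub_comm]; simpa using hn
        have : |closest - d| = |d - closest| := abs_sub_comm _ _
        omega
      rw [pvBLoop, if_neg h0]
      ring
    · rw [if_neg hdiff]
      simpa using pvLoop_agree d xs 0
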